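-- pv_equiv track=rewrite | github.com/ossydotpy/autocorrect | utils.py | switch_one_letter
-- ===== SOURCE A (Python) =====
-- def split_word(word):
--     """
--     Splits a word into all possible combinations of left and right substrings.
--
--     Args:
--     word (str): The word to be split.
--
--     Returns:
--     list: A list of tuples containing all possible splits of the word.
--     """
--
--     splits = []
--     for i in range(len(word) + 1):
--         splits.append((word[0:i], word[i:]))
--     return splits
--
-- def switch_one_letter(word):
--     """
--     Generates a list of words by switching adjacent letters in the input word.
--
--     Args:
--     word (str): The input word.
--
--     Returns:
--     list: A list of words obtained by switching adjacent letters in the input word.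
--     """
--
--     new_words = []
--     splits = split_word(word)
--     for split in splits:
--         L, R = split
--         if len(R) > 1:
--             new_words.append(L + R[1] + R[0] + R[2:])
--
--     return new_words
-- ===== SOURCE B (Python) =====
-- def switch_one_letter(word):
--     """List of words obtained by swapping each adjacent pair of letters, one pass over positions."""
--     return [word[:i] + word[i + 1] + word[i] + word[i + 2:] for i in range(len(word) - 1)]
-- ===== Notes on version B (the rewrite author's own statement) =====
-- stated objective: simpler
-- what changed: Replaced the materialised table of all prefix/suffix splits plus the len(R)>1 filter-and-transform loop by a single comprehension over adjacent positions i that emits word[:i]+word[i+1]+word[i]+word[i+2:] directly.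
import Mathlib
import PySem

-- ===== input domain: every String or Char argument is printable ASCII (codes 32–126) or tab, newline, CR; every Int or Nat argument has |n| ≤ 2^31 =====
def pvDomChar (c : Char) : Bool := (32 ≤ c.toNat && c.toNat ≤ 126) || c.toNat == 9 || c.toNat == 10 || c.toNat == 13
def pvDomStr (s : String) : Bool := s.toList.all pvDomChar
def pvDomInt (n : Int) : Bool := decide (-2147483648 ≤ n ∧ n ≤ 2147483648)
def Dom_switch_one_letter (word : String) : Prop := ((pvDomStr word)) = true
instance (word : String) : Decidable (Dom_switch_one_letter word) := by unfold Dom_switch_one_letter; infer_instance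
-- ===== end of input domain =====

-- B replaces A's table of all prefix/suffix splits (and its len(R)>1 filter) by one direct
-- comprehension over adjacent positions; same cost, simpler decomposition. Equivalence proved below.

-- ===== PORT A =====
-- split_word: for i in range(len(word)+1): splits.append((word[0:i], word[i:]))
def split_word (word : List Char) : List (List Char × List Char) :=
  (PySem.List.pyRange 0 ((word.length : Int) + 1) 1).foldl
    (fun acc i =>
      acc ++ [(PySem.List.slice word (some 0) (some i), PySem.List.slice word (some i) none)]) []

-- for (L, R) in splits: if len(R) > 1: new_words.append(L + R[1] + R[0] + R[2:])
-- Under the guard len(R) > 1, the match below is exactly R[1] + R[0] + R[2:]; the fallback arm is unreachable.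
def switch_one_letter (word : String) : List String :=
  (split_word word.toList).foldl
    (fun acc p =>
      if 1 < p.2.length then
        acc ++ [String.ofList (p.1 ++ (match p.2 with
          | c0 :: c1 :: rest => c1 :: c0 :: rest
          | r => r))]
      else acc) []

-- ===== PORT B =====
-- [word[:i] + word[i+1] + word[i] + word[i+2:] for i in range(len(word)-1)]
-- word[i+1] / word[i] are single characters; for i in the range both indices are in bounds,
-- so pyGet? is some and Option.toList is exactly that one-character string.
def switch_one_letter_alt (word : String) : List String :=
  let cs := word.toList
  (PySem.List.pyRange 0 ((cs.length : Int) - 1) 1).map (fun i =>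
    String.ofList (PySem.List.slice cs none (some i)
      ++ (PySem.List.pyGet? cs (i + 1)).toList
      ++ (PySem.List.pyGet? cs i).toList
      ++ PySem.List.slice cs (some (i + 2)) none))

-- ===== PRECONDITION & SPEC =====
def Spec_switch_one_letter (word : String) (out : List String) : Prop := out = switch_one_letter_alt word
instance (word : String) (out : List String) : Decidable (Spec_switch_one_letter word out) := by unfold Spec_switch_one_letter; infer_instance

-- ===== CLAIM (what is proved, stated in full; the proofs are below) =====
def Claim_equal_switch_one_letter : Prop := ∀ (word : String), Dom_switch_one_letter word → Spec_switch_one_letter word (switch_one_letter word)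

-- ===== LEMMAS AND PROOFS =====

theorem filter_range_lt (n m : Nat) (h : m ≤ n) :
    (List.range n).filter (fun k => decide (k < m)) = List.range m := by
  induction n with
  | zero => interval_cases m; rfl
  | succ n ih =>
    rcases Nat.lt_or_ge m (n+1) with hm | hm
    · rw [List.range_succ, List.filter_append, ih (by omega)]
      simp; omega
    · have : m = n + 1 := by omega
      subst this
      rw [List.filter_eq_self.mpr]
      intro a ha
      simp only [List.mem_range] at ha
      simp
      omega

theorem split_word_eq (cs : List Char) :
    split_word cs = (PySem.List.pyRange 0 ((cs.length : Int) + 1) 1).map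
      (fun i => (PySem.List.slice cs (some 0) (some i), PySem.List.slice cs (some i) none)) := by
  unfold split_word
  rw [PySem.List.foldl_append_singleton_eq_map]
  simp

theorem switch_A_eq (cs : List Char) :
    switch_one_letter (String.ofList cs) =
      (List.range (cs.length - 1)).map (fun k =>
        String.ofList (cs.take k ++ (cs[k+1]?).toList ++ (cs[k]?).toList ++ cs.drop (k+2))) := by
  unfold switch_one_letter
  simp only [String.toList_ofList]
  rw [split_word_eq]
  rw [PySem.List.foldl_append_ite]
  rw [PySem.List.pyRange_one]
  rw [List.map_map, List.filter_map, List.map_map]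
  simp only [Function.comp_def]
  have hn : (((cs.length : Int) + 1) - 0).toNat = cs.length + 1 := by omega
  rw [hn]
  rw [List.filter_congr (q := fun k => decide (k < cs.length - 1))
      (by intro k _
          have hc : (0 : Int) + k = ((k : Nat) : Int) := by omega
          rw [hc, PySem.List.slice_from_natCast]
          simp only [List.length_drop, decide_eq_decide]
          omega)]
  rw [filter_range_lt _ _ (by omega)]
  apply List.map_congr_left
  intro k hk
  simp only [List.mem_range] at hk
  have hk1 : k + 1 < cs.length := by omega
  have hc : (0 : Int) + k = ((k : Nat) : Int) := by omega
  rw [hc, PySem.List.slice_from_natCast]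
  simp only [PySem.List.slice_zero_start, PySem.List.slice_to_natCast]
  have hd : cs.drop k = cs[k] :: cs[k+1] :: cs.drop (k+2) := by
    rw [List.drop_eq_getElem_cons (by omega), List.drop_eq_getElem_cons hk1]
  rw [hd]
  simp [hk1, Nat.lt_of_succ_lt hk1]

theorem switch_B_eq (cs : List Char) :
    switch_one_letter_alt (String.ofList cs) =
      (List.range (cs.length - 1)).map (fun k =>
        String.ofList (cs.take k ++ (cs[k+1]?).toList ++ (cs[k]?).toList ++ cs.drop (k+2))) := by
  unfold switch_one_letter_alt
  simp only [String.toList_ofList]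
  rw [PySem.List.pyRange_one]
  have : (((cs.length : Int) - 1) - 0).toNat = cs.length - 1 := by omega
  rw [this, List.map_map]
  apply List.map_congr_left
  intro k hk
  simp only [List.mem_range] at hk
  simp only [Function.comp]
  have h0 : (0 : Int) + k = ((k : Nat) : Int) := by omega
  have h1 : (0 : Int) + k + 1 = (((k+1) : Nat) : Int) := by omega
  have h2 : (0 : Int) + k + 2 = (((k+2) : Nat) : Int) := by omega
  rw [h1, h2]
  rw [h0, PySem.List.slice_to_natCast, PySem.List.slice_from_natCast]
  simp only [PySem.List.pyGet?_natCast]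

-- ===== VERDICT (by name: the statement is the Claim_ definition above) =====
theorem switch_one_letter_spec : Claim_equal_switch_one_letter := by
  intro word _
  unfold Spec_switch_one_letter
  have h : word = String.ofList word.toList := by simp
  rw [h, switch_A_eq, switch_B_eq]
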